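-- pv_equiv track=rewrite | github.com/pseudonym117/aoc2019 | day8/main.py | read_image
-- ===== SOURCE A (Python) =====
-- from typing import List
--
-- def read_image(raw, width, height) -> List[List[List[int]]]:
--     layer_size = width * height
--
--     layers = []
--
--     for i, c in enumerate(raw):
--         if i % layer_size == 0:
--             layers.append([])
--
--         if i % width == 0:
--             layers[-1].append([])
--
--         layers[-1][-1].append(int(c))
--
--     return layers
-- ===== SOURCE B (Python) =====
-- def read_image(raw, width, height):
--     layer_size = width * height
--     return [
--         [[int(c) for c in layer[j:j + width]] for j in range(0, len(layer), width)]
--         for layer in (raw[i:i + layer_size] for i in range(0, len(raw), layer_size))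
--     ]
-- ===== Notes on version B (the rewrite author's own statement) =====
-- stated objective: idiomatic
-- what changed: B replaces A's char-by-char enumerate loop with modulo tests and repeated layers[-1][-1] mutation by nested slicing: split raw into layer-sized slices with range(0, len(raw), layer_size), split each layer into width-sized row slices, and map int over each row.
-- intended difference: On nonempty raw with a negative width or height, A's modulo tests accidentally treat the dimensions as their absolute values and A returns a populated grid (e.g. [[[1],[2]]] for ('12', -1, 2)), while B's slicing returns an empty or row-less image ([] there), the intended reading of a non-positive dimension. — e.g. on read_image("12", -1, 2): A returns [[[1], [2]]], B returns []
-- outside the precondition, e.g. on read_image('', 0, 0): A returns [], B raises ValueError; on read_image('1a', 2, 1): A raises ValueError, B raises ValueError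
import Mathlib
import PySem

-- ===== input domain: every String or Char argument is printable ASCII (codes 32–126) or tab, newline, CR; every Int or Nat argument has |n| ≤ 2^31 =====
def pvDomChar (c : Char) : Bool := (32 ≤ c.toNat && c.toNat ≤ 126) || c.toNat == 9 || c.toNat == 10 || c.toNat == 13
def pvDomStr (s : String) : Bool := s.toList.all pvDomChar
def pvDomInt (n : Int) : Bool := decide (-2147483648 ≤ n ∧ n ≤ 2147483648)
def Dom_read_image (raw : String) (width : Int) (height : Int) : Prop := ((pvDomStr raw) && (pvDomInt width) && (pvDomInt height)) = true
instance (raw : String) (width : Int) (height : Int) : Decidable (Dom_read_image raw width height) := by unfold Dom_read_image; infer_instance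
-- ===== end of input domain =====

-- B replaces A's char-by-char scan with modulo tests by nested slicing (split into layer-sized
-- slices, then width-sized row slices); equivalence of the RETURN value is proved on Pre_ outside D_.

-- ===== PORT A =====

-- int(c) for a single character; Pre_ restricts raw to decimal digits (elsewhere Python raises ValueError)
def pvDigit (c : Char) : Int := (PySem.Int.ofStr? (String.singleton c)).getD 0

-- layers[-1] mutation 'layers[-1].append(…)': modify the last element ([] unreachable: i=0 appends first)
def pvModLast {α : Type} (f : α → α) : List α → List α
  | [] => []
  | [a] => [f a]
  | a :: b :: rest => a :: pvModLast f (b :: rest)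

def read_image (raw : String) (width : Int) (height : Int) : List (List (List Int)) :=
  let layer_size := width * height
  (PySem.List.enumerate raw.toList).foldl
    (fun layers ic =>
      let layers := if PySem.Int.mod ic.1 layer_size == 0 then layers ++ [([] : List (List Int))] else layers
      let layers := if PySem.Int.mod ic.1 width == 0 then pvModLast (fun layer => layer ++ [([] : List Int)]) layers else layers
      pvModLast (fun layer => pvModLast (fun row => row ++ [pvDigit ic.2]) layer) layers)
    []

-- ===== PORT B =====
def read_image_alt (raw : String) (width : Int) (height : Int) : List (List (List Int)) :=
  let layer_size := width * height
  let cs := raw.toList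
  (PySem.List.pyRange 0 (cs.length : Int) layer_size).map (fun i =>
    let layer := PySem.List.slice cs (some i) (some (i + layer_size))
    (PySem.List.pyRange 0 (layer.length : Int) width).map (fun j =>
      (PySem.List.slice layer (some j) (some (j + width))).map pvDigit))

-- ===== PRECONDITION & SPEC =====
-- Pre_ excludes inputs where Python raises: a non-digit character in raw (ValueError from int(c)
-- whenever raw is nonempty; for raw = "" the digit condition is vacuous), and width = 0 or
-- height = 0 (ZeroDivisionError from i % 0 on nonempty raw; for raw = "" A returns [] there but
-- B's range(0, 0, 0) raises ValueError, a corner neither behaviour was written for).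
def Pre_read_image (raw : String) (width : Int) (height : Int) : Prop :=
  (raw.toList.all Char.isDigit) = true ∧ width ≠ 0 ∧ height ≠ 0
instance (raw : String) (width : Int) (height : Int) : Decidable (Pre_read_image raw width height) := by unfold Pre_read_image; infer_instance

def pvWitness_read_image : String × Int × Int := ("123456789012", 3, 2)

-- On nonempty raw with a negative width or height A's modulo-zero tests accidentally behave as if
-- the dimensions were their absolute values and A returns a populated grid, while B's slicing
-- returns an empty (or row-less) image, the intended reading of a non-positive dimension.
def D_read_image (raw : String) (width : Int) (height : Int) : Prop :=
  raw ≠ "" ∧ (width < 0 ∨ height < 0)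
instance (raw : String) (width : Int) (height : Int) : Decidable (D_read_image raw width height) := by unfold D_read_image; infer_instance

def Spec_read_image (raw : String) (width : Int) (height : Int) (out : List (List (List Int))) : Prop :=
  ¬ D_read_image raw width height → out = read_image_alt raw width height
instance (raw : String) (width : Int) (height : Int) (out : List (List (List Int))) : Decidable (Spec_read_image raw width height out) := by unfold Spec_read_image; infer_instance

def pvDiffWitness_read_image : String × Int × Int := ("12", -1, 2)
def pvDiffWitnessOut_read_image : (List (List (List Int))) × (List (List (List Int))) := ([[[1], [2]]], [])

-- ===== CLAIM (what is proved, stated in full; the proofs are below) =====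
def Claim_unchanged_read_image : Prop := ∀ (raw : String) (width : Int) (height : Int), Dom_read_image raw width height → Pre_read_image raw width height → Spec_read_image raw width height (read_image raw width height)
def Claim_changed_read_image : Prop := Dom_read_image (pvDiffWitness_read_image.1) (pvDiffWitness_read_image.2.1) (pvDiffWitness_read_image.2.2) ∧ Pre_read_image (pvDiffWitness_read_image.1) (pvDiffWitness_read_image.2.1) (pvDiffWitness_read_image.2.2) ∧ D_read_image (pvDiffWitness_read_image.1) (pvDiffWitness_read_image.2.1) (pvDiffWitness_read_image.2.2) ∧ read_image (pvDiffWitness_read_image.1) (pvDiffWitness_read_image.2.1) (pvDiffWitness_read_image.2.2) = pvDiffWitnessOut_read_image.1 ∧ read_image_alt (pvDiffWitness_read_image.1) (pvDiffWitness_read_image.2.1) (pvDiffWitness_read_image.2.2) = pvDiffWitnessOut_read_image.2 ∧ pvDiffWitnessOut_read_image.1 ≠ pvDiffWitnessOut_read_image.2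

def Claim_exact_read_image : Prop := ∀ (raw : String) (width : Int) (height : Int), Dom_read_image raw width height → Pre_read_image raw width height → D_read_image raw width height → read_image raw width height ≠ read_image_alt raw width height

-- ===== LEMMAS AND PROOFS =====

def pvChunks {α : Type} (k : Nat) (xs : List α) : List (List α) :=
  if h : k = 0 ∨ xs = [] then [] else xs.take k :: pvChunks k (xs.drop k)
termination_by xs.length
decreasing_by
  simp only [List.length_drop]
  rcases Nat.eq_zero_or_pos k with hk | hk
  · exact absurd (Or.inl hk) h
  · have hx : xs ≠ [] := fun he => h (Or.inr he)
    have : 0 < xs.length := List.length_pos_iff.mpr hx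
    omega


theorem pvChunks_zero {α : Type} (xs : List α) : pvChunks 0 xs = [] := by
  rw [pvChunks]; simp

theorem pvModLast_cons {α : Type} (f : α → α) (a : α) {l : List α} (hl : l ≠ []) :
    pvModLast f (a :: l) = a :: pvModLast f l := by
  cases l with
  | nil => exact absurd rfl hl
  | cons b rest => rfl

theorem pvModLast_length {α : Type} (f : α → α) (l : List α) :
    (pvModLast f l).length = l.length := by
  induction l with
  | nil => rfl
  | cons a l ih =>
    cases l with
    | nil => rfl
    | cons b rest =>
      rw [pvModLast_cons f a (by simp), List.length_cons, ih]
      simp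

theorem pvModLast_ne_nil {α : Type} (f : α → α) {l : List α} (hl : l ≠ []) :
    pvModLast f l ≠ [] := by
  intro he
  have := pvModLast_length f l
  rw [he] at this
  exact hl (List.eq_nil_of_length_eq_zero this.symm)

theorem pvChunks_nil {α : Type} (k : Nat) : pvChunks (α := α) k [] = [] := by
  rw [pvChunks]; simp

theorem pvChunks_ne_nil {α : Type} {k : Nat} {xs : List α} (hk : k ≠ 0) (hx : xs ≠ []) :
    pvChunks k xs ≠ [] := by
  rw [pvChunks]; simp [hk, hx]

theorem pvChunks_short {α : Type} {k : Nat} {xs : List α} (hk : k ≠ 0) (hx : xs ≠ [])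
    (hlen : xs.length ≤ k) : pvChunks k xs = [xs] := by
  rw [pvChunks]
  simp [hk, hx, List.take_of_length_le hlen, List.drop_eq_nil_of_le hlen, pvChunks_nil]

theorem pvModLast_append_singleton {α : Type} (f : α → α) (ys : List α) (a : α) :
    pvModLast f (ys ++ [a]) = ys ++ [f a] := by
  induction ys with
  | nil => rfl
  | cons y ys ih => rw [List.cons_append, pvModLast_cons f y (by simp), ih, List.cons_append]

theorem pvModLast_pvModLast {α : Type} (f g : α → α) (l : List α) :
    pvModLast f (pvModLast g l) = pvModLast (fun a => f (g a)) l := by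
  induction l with
  | nil => rfl
  | cons a l ih =>
    cases l with
    | nil => rfl
    | cons b rest =>
      rw [pvModLast_cons g a (by simp), pvModLast_cons f a (pvModLast_ne_nil g (by simp)),
        pvModLast_cons _ a (by simp), ih]

theorem pvChunks_map {α β : Type} (f : α → β) (k : Nat) (xs : List α) :
    pvChunks k (xs.map f) = (pvChunks k xs).map (List.map f) := by
  induction hn : xs.length using Nat.strong_induction_on generalizing xs with
  | _ n ih =>
    by_cases hk : k = 0
    · subst hk; rw [pvChunks_zero, pvChunks_zero]; rfl
    by_cases hx : xs = []
    · simp [hx, pvChunks_nil]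
    have hxl : 0 < xs.length := List.length_pos_iff.mpr hx
    conv_lhs => rw [pvChunks]
    conv_rhs => rw [pvChunks]
    rw [dif_neg (show ¬(k = 0 ∨ xs.map f = []) by simp [hk, hx]),
        dif_neg (show ¬(k = 0 ∨ xs = []) by simp [hk, hx])]
    simp only [List.map_cons, ← List.map_take, ← List.map_drop]
    congr 1
    exact ih (xs.drop k).length (by subst hn; simp; omega) _ rfl

theorem pvChunks_append {α : Type} {k : Nat} (hk : k ≠ 0) (xs : List α) (x : α) :
    pvChunks k (xs ++ [x]) =
      if k ∣ xs.length then pvChunks k xs ++ [[x]]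
      else pvModLast (· ++ [x]) (pvChunks k xs) := by
  induction hn : xs.length using Nat.strong_induction_on generalizing xs with
  | _ n ih =>
    subst hn
    by_cases hx : xs = []
    · subst hx
      rw [List.nil_append, List.length_nil, if_pos (dvd_zero k), pvChunks_nil, List.nil_append,
        pvChunks_short hk (by simp) (by simp; omega)]
    have hxl : 0 < xs.length := List.length_pos_iff.mpr hx
    by_cases hlen : xs.length < k
    · have hnd : ¬ k ∣ xs.length := fun hd => by have := Nat.le_of_dvd hxl hd; omega
      rw [if_neg hnd, pvChunks_short hk hx (by omega),
        pvChunks_short hk (by simp) (by simp; omega), pvModLast]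
    have hkle : k ≤ xs.length := by omega
    conv_lhs => rw [pvChunks]
    rw [dif_neg (show ¬(k = 0 ∨ xs ++ [x] = []) by simp [hk]),
      List.take_append_of_le_length hkle, List.drop_append_of_le_length hkle]
    conv_rhs => rw [pvChunks]
    rw [dif_neg (show ¬(k = 0 ∨ xs = []) by simp [hk, hx])]
    have hdropiff : (k ∣ (xs.drop k).length) ↔ (k ∣ xs.length) := by
      simp only [List.length_drop]
      constructor
      · intro hd; rcases hd with ⟨c, hc⟩; exact ⟨c + 1, by rw [Nat.mul_succ]; omega⟩
      · intro hd; exact Nat.dvd_sub hd (dvd_refl k)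
    by_cases hdrop : xs.drop k = []
    · have hlen' : xs.length = k := by
        have := List.drop_eq_nil_iff.mp hdrop; omega
      rw [hdrop, if_pos (by rw [hlen']), List.nil_append,
        pvChunks_short hk (by simp) (by simp; omega), pvChunks_nil]
      simp
    · rw [ih (xs.drop k).length (by simp; omega) _ rfl]
      by_cases hd : k ∣ xs.length
      · rw [if_pos (hdropiff.mpr hd), if_pos hd]; simp
      · rw [if_neg (fun hh => hd (hdropiff.mp hh)), if_neg hd,
          pvModLast_cons _ _ (pvChunks_ne_nil hk hdrop)]

theorem pvNest_append {α : Type} {w h : Nat} (hw : w ≠ 0) (hh : h ≠ 0) (xs : List α) (x : α) :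
    (pvChunks (w * h) (xs ++ [x])).map (pvChunks w) =
      if (w * h) ∣ xs.length then (pvChunks (w * h) xs).map (pvChunks w) ++ [[[x]]]
      else if w ∣ xs.length then pvModLast (· ++ [[x]]) ((pvChunks (w * h) xs).map (pvChunks w))
      else pvModLast (pvModLast (· ++ [x])) ((pvChunks (w * h) xs).map (pvChunks w)) := by
  have hL : w * h ≠ 0 := Nat.mul_ne_zero hw hh
  induction hn : xs.length using Nat.strong_induction_on generalizing xs with
  | _ n ih =>
    subst hn
    by_cases hx : xs = []
    · subst hx
      rw [List.nil_append, List.length_nil, if_pos (dvd_zero _), pvChunks_nil,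
        pvChunks_short hL (by simp) (by simp; omega)]
      simp only [List.map_cons, List.map_nil,
        pvChunks_short (xs := [x]) hw (by simp) (by simp; omega)]
      simp
    have hxl : 0 < xs.length := List.length_pos_iff.mpr hx
    by_cases hlen : xs.length < w * h
    · -- single layer on both sides
      have hnL : ¬ (w * h) ∣ xs.length := fun hd => by have := Nat.le_of_dvd hxl hd; omega
      rw [if_neg hnL, pvChunks_short hL hx (by omega),
        pvChunks_short hL (by simp) (by simp; omega)]
      simp only [List.map_cons, List.map_nil]
      rw [pvChunks_append hw xs x]
      by_cases hd : w ∣ xs.length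
      · rw [if_pos hd, if_pos hd, pvModLast]
      · rw [if_neg hd, if_neg hd, pvModLast]
    have hkle : w * h ≤ xs.length := by omega
    -- peel the first full layer on both sides
    conv_lhs => rw [pvChunks]
    rw [dif_neg (show ¬(w * h = 0 ∨ xs ++ [x] = []) by simp [hL]),
      List.take_append_of_le_length hkle, List.drop_append_of_le_length hkle]
    conv_rhs => rw [pvChunks]
    rw [dif_neg (show ¬(w * h = 0 ∨ xs = []) by simp [hL, hx])]
    have hdropL : (w * h ∣ (xs.drop (w * h)).length) ↔ (w * h ∣ xs.length) := by
      simp only [List.length_drop]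
      constructor
      · intro hd; rcases hd with ⟨c, hc⟩; exact ⟨c + 1, by rw [Nat.mul_succ]; omega⟩
      · intro hd; exact Nat.dvd_sub hd (dvd_refl _)
    have hdropw : (w ∣ (xs.drop (w * h)).length) ↔ (w ∣ xs.length) := by
      simp only [List.length_drop]
      have hwL : w ∣ w * h := Dvd.intro h rfl
      constructor
      · intro hd
        have : w ∣ (xs.length - w * h) + w * h := Nat.dvd_add hd hwL
        simpa [Nat.sub_add_cancel hkle] using this
      · intro hd; exact Nat.dvd_sub hd hwL
    by_cases hdrop : xs.drop (w * h) = []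
    · have hlen' : xs.length = w * h := by
        have := List.drop_eq_nil_iff.mp hdrop; omega
      rw [hdrop, if_pos (by rw [hlen']), List.nil_append,
        pvChunks_short hL (by simp) (by simp; omega), pvChunks_nil]
      simp only [List.map_cons, List.map_nil,
        pvChunks_short (xs := [x]) hw (by simp) (by simp; omega)]
      simp
    · simp only [List.map_cons]
      rw [ih (xs.drop (w * h)).length (by simp; omega) _ rfl]
      have hne : (pvChunks (w * h) (xs.drop (w * h))).map (pvChunks w) ≠ [] := by
        simp [pvChunks_ne_nil hL hdrop]
      by_cases hdL : (w * h) ∣ xs.length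
      · rw [if_pos (hdropL.mpr hdL), if_pos hdL]; simp
      · rw [if_neg (fun hh2 => hdL (hdropL.mp hh2)), if_neg hdL]
        by_cases hdw : w ∣ xs.length
        · rw [if_pos (hdropw.mpr hdw), if_pos hdw, pvModLast_cons _ _ hne]
        · rw [if_neg (fun hh2 => hdw (hdropw.mp hh2)), if_neg hdw, pvModLast_cons _ _ hne]

theorem pvRange_pos_count (a b s : Int) (hs : 0 < s) :
    PySem.List.pyRange a b s =
      (List.range (if a < b then ((b - a + s - 1) / s).toNat else 0)).map (fun k : Nat => a + s * (k : Int)) :=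
  PySem.List.pyRange_of_pos a b hs

theorem pvCeil_succ {c s : Int} (hs : 0 < s) (hc : 0 < c) :
    ((c + s - 1) / s).toNat = ((c - 1) / s).toNat + 1 := by
  have h1 : (c + s - 1) / s = (c - 1) / s + 1 := by
    have := Int.add_mul_ediv_right (c - 1) 1 (by omega : s ≠ 0)
    rw [show c + s - 1 = c - 1 + 1 * s by ring, this]
  have h4 : 0 ≤ (c - 1) / s := Int.ediv_nonneg (by omega) (by omega)
  omega

theorem pvRange_pos_cons {a b s : Int} (hs : 0 < s) (hab : a < b) :
    PySem.List.pyRange a b s = a :: PySem.List.pyRange (a + s) b s := by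
  rw [pvRange_pos_count a b s hs, pvRange_pos_count (a + s) b s hs, if_pos hab]
  rw [show b - a + s - 1 = (b - a) + s - 1 by ring, pvCeil_succ hs (by omega)]
  by_cases h2 : a + s < b
  · rw [if_pos h2, show b - (a + s) + s - 1 = (b - a) - 1 by ring]
    rw [List.range_succ_eq_map, List.map_cons, List.map_map]
    refine congrArg₂ _ (by simp) ?_
    apply List.map_congr_left
    intro x _
    simp [Nat.succ_eq_add_one]
    ring
  · rw [if_neg h2]
    have hz : ((b - a) - 1) / s = 0 := Int.ediv_eq_zero_of_lt (by omega) (by omega)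
    rw [show b - a - 1 = (b - a) - 1 by ring, hz]
    simp

theorem pvRange_pos_shift {a b s : Int} (hs : 0 < s) :
    PySem.List.pyRange (a + s) b s = (PySem.List.pyRange a (b - s) s).map (· + s) := by
  rw [pvRange_pos_count _ b s hs, pvRange_pos_count a (b - s) s hs]
  by_cases h : a + s < b
  · rw [if_pos h, if_pos (by omega), List.map_map,
      show b - (a + s) + s - 1 = b - s - a + s - 1 by ring]
    apply List.map_congr_left
    intro x _
    simp
    ring
  · rw [if_neg h, if_neg (by omega)]
    simp

theorem pvRangeSlice {β γ : Type} {k : Int} (hk : 0 < k) (cs : List β) (g : List β → γ) :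
    (PySem.List.pyRange 0 (cs.length : Int) k).map
        (fun i => g (PySem.List.slice cs (some i) (some (i + k)))) =
      (pvChunks k.toNat cs).map g := by
  have hkt : k.toNat ≠ 0 := by omega
  induction hn : cs.length using Nat.strong_induction_on generalizing cs with
  | _ n ih =>
    subst hn
    by_cases hcs : cs = []
    · subst hcs
      rw [pvRange_pos_count 0 _ k hk]
      simp [pvChunks_nil]
    have h0 : (0 : Int) < (cs.length : Int) := by
      have := List.length_pos_iff.mpr hcs; omega
    rw [pvRange_pos_cons hk h0, List.map_cons, pvRange_pos_shift hk, List.map_map]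
    by_cases hsmall : cs.length ≤ k.toNat
    · have htail : PySem.List.pyRange 0 ((cs.length : Int) - k) k = [] := by
        rw [pvRange_pos_count 0 _ k hk, if_neg (by omega)]; rfl
      rw [htail, pvChunks_short hkt hcs hsmall]
      simp only [List.map_nil, List.map_cons]
      congr 2
      rw [zero_add, PySem.List.slice_toNat cs le_rfl (le_of_lt hk)]
      simp [List.take_of_length_le hsmall]
    · have hlen' : ((cs.length : Int) - k) = (((cs.drop k.toNat).length : Int)) := by
        simp only [List.length_drop]; omega
      rw [hlen']
      conv_rhs => rw [pvChunks]
      rw [dif_neg (show ¬(k.toNat = 0 ∨ cs = []) by simp [hkt, hcs])]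
      rw [List.map_cons]
      congr 1
      · congr 1
        rw [zero_add, PySem.List.slice_toNat cs le_rfl (le_of_lt hk)]
        simp
      · rw [← ih (cs.drop k.toNat).length (by simp; omega) _ rfl]
        apply List.map_congr_left
        intro i hi
        have hi0 : 0 ≤ i := ((PySem.List.mem_pyRange_iff_of_pos hk i).mp hi).1
        simp only [Function.comp_apply]
        congr 1
        rw [PySem.List.slice_toNat cs (by omega) (by omega),
          PySem.List.slice_toNat _ (by omega) (by omega), List.drop_drop,
          show (i + k + k).toNat - (i + k).toNat = (i + k).toNat - i.toNat by omega,
          show k.toNat + i.toNat = (i + k).toNat by omega]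

theorem pvFoldA (w h : Int) (hw : w ≠ 0) (hh : h ≠ 0) (cs : List Char) :
    (PySem.List.enumerate cs).foldl
      (fun layers ic =>
        let layers := if PySem.Int.mod ic.1 (w * h) == 0 then layers ++ [([] : List (List Int))] else layers
        let layers := if PySem.Int.mod ic.1 w == 0 then pvModLast (fun layer => layer ++ [([] : List Int)]) layers else layers
        pvModLast (fun layer => pvModLast (fun row => row ++ [pvDigit ic.2]) layer) layers)
      [] =
    (pvChunks ((w * h).natAbs) (cs.map pvDigit)).map (pvChunks w.natAbs) := by
  have hmul : (w * h).natAbs = w.natAbs * h.natAbs := Int.natAbs_mul w h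
  induction cs using List.reverseRecOn with
  | nil => simp [PySem.List.enumerate_nil, pvChunks_nil]
  | append_singleton cs c ih =>
    rw [PySem.List.enumerate_append, List.foldl_append, ih]
    rw [show PySem.List.enumerate [c] (0 + (cs.length : Int)) = [((cs.length : Int), c)] by
      rw [PySem.List.enumerate_cons, PySem.List.enumerate_nil]; norm_num]
    rw [List.foldl_cons, List.foldl_nil]
    have hconvL : PySem.Int.mod (cs.length : Int) (w * h) = 0 ↔ (w * h).natAbs ∣ cs.length := by
      rw [PySem.Int.mod_eq_zero_iff_dvd, ← Int.natAbs_dvd, Int.natCast_dvd_natCast]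
    have hconvw : PySem.Int.mod (cs.length : Int) w = 0 ↔ w.natAbs ∣ cs.length := by
      rw [PySem.Int.mod_eq_zero_iff_dvd, ← Int.natAbs_dvd, Int.natCast_dvd_natCast]
    simp only [beq_iff_eq]
    rw [List.map_append, List.map_singleton, hmul,
      pvNest_append (by simpa using hw) (by simpa using hh) (cs.map pvDigit) (pvDigit c)]
    simp only [List.length_map]
    by_cases hdL : (w.natAbs * h.natAbs) ∣ cs.length
    · have hdw : w.natAbs ∣ cs.length := dvd_trans (Dvd.intro h.natAbs rfl) hdL
      rw [if_pos (hconvL.mpr (by rw [hmul]; exact hdL)), if_pos (hconvw.mpr hdw),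
        if_pos hdL, pvModLast_append_singleton, pvModLast_append_singleton]
      rfl
    · rw [if_neg (show ¬ PySem.Int.mod (cs.length : Int) (w * h) = 0 from
        fun hc => hdL (by rw [← hmul]; exact hconvL.mp hc)), if_neg hdL]
      by_cases hdw : w.natAbs ∣ cs.length
      · rw [if_pos (hconvw.mpr hdw), if_pos hdw, pvModLast_pvModLast]
        congr 1
        funext layer
        rw [pvModLast_append_singleton]
        rfl
      · rw [if_neg (show ¬ PySem.Int.mod (cs.length : Int) w = 0 from
          fun hc => hdw (hconvw.mp hc)), if_neg hdw]

theorem pvRange_neg_nil {b s : Int} (hs : s < 0) (hb : 0 ≤ b) :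
    PySem.List.pyRange 0 b s = [] := by
  simp [PySem.List.pyRange]
  intro _
  rw [if_neg (by omega : ¬ (0 : Int) < s), if_neg (by omega : ¬ b < 0)]

theorem pvAltEq (w h : Int) (hw : 0 < w) (hh : 0 < h) (cs : List Char) :
    (PySem.List.pyRange 0 (cs.length : Int) (w * h)).map (fun i =>
      let layer := PySem.List.slice cs (some i) (some (i + w * h))
      (PySem.List.pyRange 0 (layer.length : Int) w).map (fun j =>
        (PySem.List.slice layer (some j) (some (j + w))).map pvDigit)) =
    (pvChunks ((w * h).toNat) cs).map
      (fun layer => (pvChunks w.toNat layer).map (List.map pvDigit)) := by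
  rw [pvRangeSlice (by positivity) cs
    (fun layer => (PySem.List.pyRange 0 (layer.length : Int) w).map (fun j =>
      (PySem.List.slice layer (some j) (some (j + w))).map pvDigit))]
  exact List.map_congr_left (fun layer _ => pvRangeSlice hw layer (List.map pvDigit))

-- ===== VERDICT (by name: the statement is the Claim_ definition above) =====
theorem read_image_spec : Claim_unchanged_read_image := by
  intro raw w h hdom hpre
  unfold Spec_read_image
  intro hnD
  obtain ⟨hdig, hw0, hh0⟩ := hpre
  by_cases hcs : raw.toList = []
  · simp [read_image, read_image_alt, hcs, PySem.List.enumerate_nil, PySem.List.pyRange,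
      mul_ne_zero hw0 hh0]
  · have hraw : raw ≠ "" := fun he => hcs (by simp [he])
    have hor : ¬ (w < 0 ∨ h < 0) := fun hor => hnD ⟨hraw, hor⟩
    have hw : 0 < w := by omega
    have hh : 0 < h := by omega
    unfold read_image read_image_alt
    simp only []
    rw [pvFoldA w h hw0 hh0 raw.toList,
      show (w * h).natAbs = (w * h).toNat by have := mul_pos hw hh; omega, show w.natAbs = w.toNat by omega,
      pvAltEq w h hw hh raw.toList, pvChunks_map, List.map_map]
    exact List.map_congr_left (fun layer _ => by simp [pvChunks_map])

theorem read_image_changed : Claim_changed_read_image := by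
  unfold Claim_changed_read_image; decide

theorem read_image_tight : Claim_exact_read_image := by
  intro raw w h hdom hpre hd
  obtain ⟨hdig, hw0, hh0⟩ := hpre
  obtain ⟨hraw, hor⟩ := hd
  have hcs : raw.toList ≠ [] := by
    intro he
    exact hraw (by simpa using he)
  unfold read_image read_image_alt
  simp only []
  rw [pvFoldA w h hw0 hh0 raw.toList]
  have hds : raw.toList.map pvDigit ≠ [] := by simp [hcs]
  have hLne : (w * h).natAbs ≠ 0 := Int.natAbs_ne_zero.mpr (mul_ne_zero hw0 hh0)
  have hwne : w.natAbs ≠ 0 := Int.natAbs_ne_zero.mpr hw0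
  have hA : pvChunks ((w * h).natAbs) (raw.toList.map pvDigit) =
      (raw.toList.map pvDigit).take ((w * h).natAbs) ::
        pvChunks ((w * h).natAbs) ((raw.toList.map pvDigit).drop ((w * h).natAbs)) := by
    conv_lhs => rw [pvChunks]
    rw [dif_neg (by simp [hLne, hds])]
  rw [hA, List.map_cons]
  have hhead : pvChunks w.natAbs ((raw.toList.map pvDigit).take ((w * h).natAbs)) ≠ [] :=
    pvChunks_ne_nil hwne (by simp [List.take_eq_nil_iff, hLne, hds])
  intro heq
  by_cases hLpos : 0 < w * h
  · have hwneg : w < 0 := by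
      rcases hor with h1 | h1
      · exact h1
      · nlinarith
    have hmem : pvChunks w.natAbs ((raw.toList.map pvDigit).take ((w * h).natAbs)) ∈
        (PySem.List.pyRange 0 ((raw.toList.length : Int)) (w * h)).map (fun i =>
          let layer := PySem.List.slice raw.toList (some i) (some (i + w * h))
          (PySem.List.pyRange 0 ((layer.length : Int)) w).map (fun j =>
            (PySem.List.slice layer (some j) (some (j + w))).map pvDigit)) := by
      rw [← heq]
      exact List.mem_cons_self
    rw [List.mem_map] at hmem
    obtain ⟨i, _, hmem⟩ := hmem
    apply hhead
    rw [← hmem]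
    simp only [pvRange_neg_nil hwneg (Int.natCast_nonneg _), List.map_nil]
  · have hLneg : w * h < 0 := by
      have := mul_ne_zero hw0 hh0
      omega
    rw [pvRange_neg_nil hLneg (Int.natCast_nonneg _)] at heq
    simp at heq
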